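-- pv_equiv track=rewrite | github.com/Awetspoon/SpriteFactory | image_engine_app/engine/ingest/webpage_scan.py | _is_generic_alt_text
-- ===== SOURCE A (Python) =====
-- def _safe_slug(text: str) -> str:
--     raw = (text or "").strip()
--     if not raw:
--         return ""
--     # Keep alnum + - _ ; collapse spaces to underscores
--     out: list[str] = []
--     prev_us = False
--     for ch in raw:
--         if ch.isalnum():
--             out.append(ch)
--             prev_us = False
--         elif ch in {"-", "_"}:
--             out.append(ch)
--             prev_us = False
--         else:
--             if not prev_us:
--                 out.append("_")
--                 prev_us = True
--     slug = "".join(out).strip("_")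
--     # Avoid empty
--     return slug or "item"
--
-- _GENERIC_ALT_TOKENS = {
--     "sprite",
--     "image",
--     "thumbnail",
--     "enlarge",
--     "zoom",
--     "view",
--     "open",
--     "click",
--     "preview",
--     "full",
--     "size",
-- }
--
-- def _is_generic_alt_text(alt_text: str) -> bool:
--     cleaned = _safe_slug(alt_text).lower()
--     if not cleaned:
--         return True
--
--     tokens = [token for token in cleaned.split("_") if token]
--     if not tokens:
--         return True
--
--     if all(token in _GENERIC_ALT_TOKENS for token in tokens):
--         return True
--
--     return False
-- ===== SOURCE B (Python) =====
-- import re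
--
-- _GENERIC_ALT_TOKENS = {
--     "sprite",
--     "image",
--     "thumbnail",
--     "enlarge",
--     "zoom",
--     "view",
--     "open",
--     "click",
--     "preview",
--     "full",
--     "size",
-- }
--
-- def _is_generic_alt_text(alt_text: str) -> bool:
--     raw = (alt_text or "").strip()
--     if not raw:
--         return True
--     slug = re.sub(r"[^A-Za-z0-9_-]+", "_", raw).strip("_") or "item"
--     return all(t in _GENERIC_ALT_TOKENS for t in slug.lower().split("_") if t)
-- ===== Notes on version B (the rewrite author's own statement) =====
-- stated objective: idiomatic
-- what changed: B inlines the slug helper and replaces the char-by-char loop with its prev_us flag by one regex substitution that collapses each run of disallowed characters to a single underscore, keeping the strip-underscores / item fallback and the split-and-check in one expression.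
import Mathlib
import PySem

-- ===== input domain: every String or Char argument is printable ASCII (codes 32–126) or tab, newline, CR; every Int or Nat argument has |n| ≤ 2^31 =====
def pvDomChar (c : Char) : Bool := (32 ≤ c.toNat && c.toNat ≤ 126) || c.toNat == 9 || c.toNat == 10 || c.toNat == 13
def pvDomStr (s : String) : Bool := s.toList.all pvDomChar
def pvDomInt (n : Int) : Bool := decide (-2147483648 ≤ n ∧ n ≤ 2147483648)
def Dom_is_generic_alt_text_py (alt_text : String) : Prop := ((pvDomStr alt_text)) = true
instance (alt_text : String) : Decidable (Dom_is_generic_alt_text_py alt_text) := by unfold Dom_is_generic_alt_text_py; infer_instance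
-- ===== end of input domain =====

-- B inlines the slug computation and replaces A's char-by-char prev_us state machine by a
-- single run-collapsing substitution (re.sub in Python, a run-consuming recursion here); objective: idiomatic/simpler.


-- the module constant _GENERIC_ALT_TOKENS (a Python set of strings)
def pvGenericAltTokens : PySem.Set (List Char) :=
  PySem.Set.ofList
    ["sprite".toList, "image".toList, "thumbnail".toList, "enlarge".toList, "zoom".toList,
     "view".toList, "open".toList, "click".toList, "preview".toList, "full".toList, "size".toList]

-- ===== PORT A =====
-- one step of _safe_slug's for-loop; state = (out, prev_us)
def pvStepA (acc : List Char × Bool) (ch : Char) : List Char × Bool :=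
  if PySem.Chars.isalnum ch then (acc.1 ++ [ch], false)
  else if ch = '-' ∨ ch = '_' then (acc.1 ++ [ch], false)
  else if acc.2 = false then (acc.1 ++ ['_'], true) else acc

-- _safe_slug
def pvSafeSlug (text : String) : List Char :=
  let raw := PySem.Chars.strip text.toList
  if raw = [] then []
  else
    let st := raw.foldl pvStepA ([], false)
    let slug := PySem.Chars.stripChars st.1 ['_']
    if slug = [] then "item".toList else slug

def is_generic_alt_text_py (alt_text : String) : Bool :=
  let cleaned := PySem.Chars.lower (pvSafeSlug alt_text)
  if cleaned = [] then true
  else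
    let tokens := (PySem.Chars.splitOn cleaned "_".toList).filter (fun t => t ≠ [])
    if tokens = [] then true
    else if tokens.all (fun t => PySem.Set.contains pvGenericAltTokens t) then true
    else false

-- ===== PORT B =====
-- the regex character class [A-Za-z0-9_-]
def pvKeep (c : Char) : Bool :=
  ('A' ≤ c && c ≤ 'Z') || ('a' ≤ c && c ≤ 'z') || ('0' ≤ c && c ≤ '9') || c = '_' || c = '-'

-- hand port of re.sub(r"[^A-Za-z0-9_-]+", "_", ·): exact — each maximal run of
-- non-class characters is replaced by one '_', class characters are kept
def pvCollapse : List Char → List Char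
  | [] => []
  | c :: rest =>
    if pvKeep c then c :: pvCollapse rest
    else '_' :: pvCollapse (rest.dropWhile (fun d => !pvKeep d))
termination_by cs => cs.length
decreasing_by
  · simp
  · exact Nat.lt_succ_of_le (List.length_dropWhile_le _ _)

def is_generic_alt_text_py_alt (alt_text : String) : Bool :=
  let raw := PySem.Chars.strip alt_text.toList
  if raw = [] then true
  else
    let slug₀ := PySem.Chars.stripChars (pvCollapse raw) ['_']
    let slug := if slug₀ = [] then "item".toList else slug₀
    ((PySem.Chars.splitOn (PySem.Chars.lower slug) "_".toList).filter (fun t => t ≠ [])).all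
      (fun t => PySem.Set.contains pvGenericAltTokens t)

-- ===== PRECONDITION & SPEC =====
def Spec_is_generic_alt_text_py (alt_text : String) (out : Bool) : Prop := out = is_generic_alt_text_py_alt alt_text
instance (alt_text : String) (out : Bool) : Decidable (Spec_is_generic_alt_text_py alt_text out) := by unfold Spec_is_generic_alt_text_py; infer_instance

-- ===== CLAIM (what is proved, stated in full; the proofs are below) =====
def Claim_equal_is_generic_alt_text_py : Prop := ∀ (alt_text : String), Dom_is_generic_alt_text_py alt_text → Spec_is_generic_alt_text_py alt_text (is_generic_alt_text_py alt_text)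

-- ===== LEMMAS AND PROOFS =====

-- A's branch tests, combined, are exactly B's character class
theorem pvKeep_eq (c : Char) :
    pvKeep c = (PySem.Chars.isalnum c || (c = '-' || c = '_')) := by
  simp only [pvKeep, PySem.Chars.isalnum, PySem.Chars.isalpha, PySem.Chars.isdigit,
    PySem.Chars.isupper, PySem.Chars.islower]
  by_cases h1 : 'A' ≤ c ∧ c ≤ 'Z' <;> by_cases h2 : 'a' ≤ c ∧ c ≤ 'z' <;>
    by_cases h3 : '0' ≤ c ∧ c ≤ '9' <;> by_cases h4 : c = '_' <;> by_cases h5 : c = '-' <;>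
    simp_all

-- A's fold from either flag state produces B's run-collapsed string
theorem foldA_eq_collapse (cs : List Char) : ∀ out : List Char,
    (cs.foldl pvStepA (out, false)).1 = out ++ pvCollapse cs ∧
    (cs.foldl pvStepA (out, true)).1 = out ++ pvCollapse (cs.dropWhile (fun d => !pvKeep d)) := by
  induction cs with
  | nil => intro out; simp [pvCollapse]
  | cons c rest ih =>
    intro out
    by_cases hk : pvKeep c = true
    · have hstep : ∀ b, pvStepA (out, b) c = (out ++ [c], false) := by
        intro b
        have := pvKeep_eq c
        rw [hk] at this
        simp only [pvStepA]
        rcases Bool.or_eq_true _ _ |>.mp this.symm with h | h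
        · simp [h]
        · rcases Bool.or_eq_true _ _ |>.mp h with h' | h'
          · simp only [decide_eq_true_eq] at h'
            by_cases ha : PySem.Chars.isalnum c = true <;> simp [h']
          · simp only [decide_eq_true_eq] at h'
            by_cases ha : PySem.Chars.isalnum c = true <;> simp [h']
      constructor
      · rw [List.foldl_cons, hstep, (ih (out ++ [c])).1, pvCollapse]
        simp [hk]
      · rw [List.foldl_cons, hstep, (ih (out ++ [c])).1, List.dropWhile_cons]
        simp [hk, pvCollapse]
    · have hnk : PySem.Chars.isalnum c = false ∧ ¬(c = '-' ∨ c = '_') := by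
        have := pvKeep_eq c
        rw [Bool.not_eq_true] at hk
        rw [hk] at this
        constructor
        · rcases Bool.or_eq_false_iff.mp this.symm with ⟨h, _⟩; exact h
        · rcases Bool.or_eq_false_iff.mp this.symm with ⟨_, h⟩
          rcases Bool.or_eq_false_iff.mp h with ⟨h1, h2⟩
          simp only [decide_eq_false_iff_not] at h1 h2
          tauto
      have hstepF : pvStepA (out, false) c = (out ++ ['_'], true) := by
        simp [pvStepA, hnk.1, hnk.2]
      have hstepT : pvStepA (out, true) c = (out, true) := by
        simp [pvStepA, hnk.1, hnk.2]
      constructor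
      · rw [List.foldl_cons, hstepF, (ih (out ++ ['_'])).2, pvCollapse]
        simp [hk]
      · rw [List.foldl_cons, hstepT, (ih out).2, List.dropWhile_cons]
        simp [hk]

theorem lower_ne_nil {cs : List Char} (h : cs ≠ []) : PySem.Chars.lower cs ≠ [] := by
  simp [PySem.Chars.lower, h]

-- A's trailing "if tokens empty / if all generic" chain collapses to B's single `all`
theorem pvIfAll {a : Type} (ts : List a) (P : a → Bool) :
    (if ts = [] then true else if ts.all P then true else false) = ts.all P := by
  by_cases h : ts = []
  · subst h; rfl
  · rw [if_neg h]
    by_cases h2 : ts.all P = true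
    · rw [if_pos h2, h2]
    · rw [if_neg h2]
      simp only [Bool.not_eq_true] at h2
      exact h2.symm

-- ===== VERDICT (by name: the statement is the Claim_ definition above) =====
theorem is_generic_alt_text_py_spec : Claim_equal_is_generic_alt_text_py := by
  intro alt_text _
  unfold Spec_is_generic_alt_text_py is_generic_alt_text_py is_generic_alt_text_py_alt pvSafeSlug
  by_cases hraw : PySem.Chars.strip alt_text.toList = []
  · simp [hraw, PySem.Chars.lower]
  · simp only [if_neg hraw]
    rw [(foldA_eq_collapse (PySem.Chars.strip alt_text.toList) []).1, List.nil_append]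
    have hne : PySem.Chars.lower
        (if PySem.Chars.stripChars (pvCollapse (PySem.Chars.strip alt_text.toList)) ['_'] = []
         then "item".toList
         else PySem.Chars.stripChars (pvCollapse (PySem.Chars.strip alt_text.toList)) ['_']) ≠ [] := by
      apply lower_ne_nil
      split
      · decide
      · assumption
    rw [if_neg hne]
    exact pvIfAll _ _
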